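-- pv_equiv track=rewrite | github.com/danielh1307/chessmait | src/preprocessing/preprocess_classification.py | evaluation_to_class
-- ===== SOURCE A (Python) =====
-- CLASSES = {
--     "DRAW": {
--         "label": 0
--     },
--     "WIN_WHITE": {
--         "min": 150,
--         "label": 1
--     },
--     "WIN_BLACK": {
--         "max": -150,
--         "label": 10
--     }
-- }
--
-- def evaluation_to_class(evaluation):
--     for key, range_dict in CLASSES.items():
--         if "min" in range_dict and "max" in range_dict:
--             min_value = range_dict["min"]
--             max_value = range_dict["max"]
--             if min_value <= evaluation <= max_value:
--                 return range_dict["label"]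
--         elif "min" in range_dict:
--             min_value = range_dict["min"]
--             if evaluation > min_value:
--                 return range_dict["label"]
--         elif "max" in range_dict:
--             max_value = range_dict["max"]
--             if evaluation < max_value:
--                 return range_dict["label"]
--
--     return 0
-- ===== SOURCE B (Python) =====
-- def evaluation_to_class(evaluation):
--     if evaluation > 150:
--         return 1
--     if evaluation < -150:
--         return 10
--     return 0
-- ===== Notes on version B (the rewrite author's own statement) =====
-- stated objective: simpler
-- what changed: Replaces the loop over the CLASSES config table with three direct conditionals (> 150 -> 1, < -150 -> 10, else 0), eliminating the dict traversal and membership tests.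
import Mathlib
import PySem

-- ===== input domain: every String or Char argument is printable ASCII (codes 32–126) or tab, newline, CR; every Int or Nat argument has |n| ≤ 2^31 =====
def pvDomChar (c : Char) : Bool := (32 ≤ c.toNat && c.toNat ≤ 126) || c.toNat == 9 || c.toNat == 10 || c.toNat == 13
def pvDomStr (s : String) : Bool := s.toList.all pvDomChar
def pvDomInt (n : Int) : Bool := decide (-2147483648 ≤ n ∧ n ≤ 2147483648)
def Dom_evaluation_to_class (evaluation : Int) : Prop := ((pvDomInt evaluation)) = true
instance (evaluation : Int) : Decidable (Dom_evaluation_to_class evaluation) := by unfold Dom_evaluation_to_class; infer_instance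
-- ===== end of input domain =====

-- B replaces A's loop over the CLASSES table with three direct conditionals (simpler).

-- ===== PORT A =====
-- The CLASSES dict: each entry is (optional "min", optional "max", label), in insertion order.
def pvCLASSES : List (Option Int × Option Int × Int) :=
  [(none, none, 0), (some 150, none, 1), (none, some (-150), 10)]

-- the for-loop over CLASSES.items(), branch order as in A
def pvLoopA (evaluation : Int) : List (Option Int × Option Int × Int) → Int
  | [] => 0
  | (mn, mx, label) :: rest =>
    match mn, mx with
    | some min_value, some max_value =>
      if min_value ≤ evaluation ∧ evaluation ≤ max_value then label
      else pvLoopA evaluation rest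
    | some min_value, none =>
      if evaluation > min_value then label else pvLoopA evaluation rest
    | none, some max_value =>
      if evaluation < max_value then label else pvLoopA evaluation rest
    | none, none => pvLoopA evaluation rest

def evaluation_to_class (evaluation : Int) : Int :=
  pvLoopA evaluation pvCLASSES

-- ===== PORT B =====
def evaluation_to_class_alt (evaluation : Int) : Int :=
  if evaluation > 150 then 1
  else if evaluation < -150 then 10
  else 0

-- ===== PRECONDITION & SPEC =====
def Spec_evaluation_to_class (evaluation : Int) (out : Int) : Prop := out = evaluation_to_class_alt evaluation
instance (evaluation : Int) (out : Int) : Decidable (Spec_evaluation_to_class evaluation out) := by unfold Spec_evaluation_to_class; infer_instance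

-- ===== CLAIM (what is proved, stated in full; the proofs are below) =====
def Claim_equal_evaluation_to_class : Prop := ∀ (evaluation : Int), Dom_evaluation_to_class evaluation → Spec_evaluation_to_class evaluation (evaluation_to_class evaluation)

-- ===== LEMMAS AND PROOFS =====

-- ===== VERDICT (by name: the statement is the Claim_ definition above) =====
theorem evaluation_to_class_spec : Claim_equal_evaluation_to_class := by
  intro e _
  show _ = _
  simp only [evaluation_to_class, evaluation_to_class_alt, pvCLASSES, pvLoopA]
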